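-- pv_equiv track=rewrite | github.com/agonymagnolia/data-science | streamlod/interface/print.py | max_threshold
-- ===== SOURCE A (Python) =====
-- def max_threshold(L, width):
--     low, high = 0, max(L)
--     best_T = low
--
--     while low <= high:
--         T = (low + high) // 2
--         if sum(min(x, T) for x in L) + 2 <= width:
--             best_T = T
--             low = T + 1
--         else:
--             high = T - 1
--
--     return best_T
-- ===== SOURCE B (Python) =====
-- def max_threshold(L, width):
--     budget = width - 2
--     s = sorted(L)
--     m = s[-1]
--     if m < 0:
--         return 0
--     if sum(s) <= budget:
--         return m
--     ans, prefix, lo, rem = 0, 0, 0, len(s)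
--     for v in s:
--         c = (budget - prefix) // rem
--         if c > v - 1:
--             c = v - 1
--         if c >= lo and c >= 0 and c > ans:
--             ans = c
--         prefix += v
--         lo = v
--         rem -= 1
--     return ans
-- ===== Notes on version B (the rewrite author's own statement) =====
-- stated objective: faster
-- what changed: A binary-searches the threshold, re-summing min(x,T) over the whole list at every probe; B sorts the list once, then walks it with a running prefix sum and directly inverts the piecewise-linear capped sum on each segment by one floor division.
import Mathlib
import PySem

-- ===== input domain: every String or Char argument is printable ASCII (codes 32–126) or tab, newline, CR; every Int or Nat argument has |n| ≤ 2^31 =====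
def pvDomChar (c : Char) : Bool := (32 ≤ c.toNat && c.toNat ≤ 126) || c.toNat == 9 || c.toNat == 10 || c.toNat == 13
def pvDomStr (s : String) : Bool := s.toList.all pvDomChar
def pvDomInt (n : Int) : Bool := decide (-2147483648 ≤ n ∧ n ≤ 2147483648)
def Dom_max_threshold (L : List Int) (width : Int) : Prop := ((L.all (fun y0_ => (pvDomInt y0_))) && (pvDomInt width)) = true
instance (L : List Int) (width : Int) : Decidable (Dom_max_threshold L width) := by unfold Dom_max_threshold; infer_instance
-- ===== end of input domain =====

-- B sorts once and inverts the capped sum segment by segment instead of binary-searching T; equal results proved on all nonempty lists.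

-- ===== PORT A =====
-- sum(min(x, T) for x in L)
def pvSumMin (L : List Int) (T : Int) : Int := (L.map (fun x => min x T)).sum

-- the 'while low <= high' loop of A; the Nat fuel only makes the recursion structural:
-- (high + 1 - low).toNat shrinks every iteration, so fuel = (m + 1).toNat never runs out
def bsLoop (L : List Int) (width : Int) : Nat → Int → Int → Int → Int
  | 0, _, _, best => best
  | fuel + 1, low, high, best =>
    if low ≤ high then
      let T := PySem.Int.floordiv (low + high) 2
      if pvSumMin L T + 2 ≤ width then bsLoop L width fuel (T + 1) high T
      else bsLoop L width fuel low (T - 1) best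
    else best

def max_threshold (L : List Int) (width : Int) : Int :=
  match PySem.List.max? L (fun x => x) with
  | none => 0          -- max([]) raises ValueError in Python: excluded by Pre_
  | some m => bsLoop L width (m + 1).toNat 0 m 0

-- ===== PORT B =====
-- body of B's 'for v in s' loop; state = (ans, prefix, lo, rem)
def altStep (budget : Int) (st : Int × Int × Int × Int) (v : Int) : Int × Int × Int × Int :=
  let c0 := PySem.Int.floordiv (budget - st.2.1) st.2.2.2
  let c := if c0 > v - 1 then v - 1 else c0
  let a := if c ≥ st.2.2.1 ∧ c ≥ 0 ∧ c > st.1 then c else st.1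
  (a, st.2.1 + v, v, st.2.2.2 - 1)

def max_threshold_alt (L : List Int) (width : Int) : Int :=
  let budget := width - 2
  let s := PySem.List.sorted L (fun x => x) false
  match PySem.List.pyGet? s (-1) with
  | none => 0          -- s[-1] raises IndexError in Python: excluded by Pre_
  | some m =>
    if m < 0 then 0
    else if s.sum ≤ budget then m
    else (s.foldl (altStep budget) (0, 0, 0, (s.length : Int))).1

-- ===== PRECONDITION & SPEC =====
-- Pre_ excludes only the empty list, on which A raises ValueError (max([])) and B raises IndexError (s[-1]).
def Pre_max_threshold (L : List Int) (width : Int) : Prop := L ≠ []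
instance (L : List Int) (width : Int) : Decidable (Pre_max_threshold L width) := by unfold Pre_max_threshold; infer_instance
def pvWitness_max_threshold : List Int × Int := ([1, 2, 3], 7)

def Spec_max_threshold (L : List Int) (width : Int) (out : Int) : Prop := out = max_threshold_alt L width
instance (L : List Int) (width : Int) (out : Int) : Decidable (Spec_max_threshold L width out) := by unfold Spec_max_threshold; infer_instance

-- ===== CLAIM (what is proved, stated in full; the proofs are below) =====
def Claim_equal_max_threshold : Prop := ∀ (L : List Int) (width : Int), Dom_max_threshold L width → Pre_max_threshold L width → Spec_max_threshold L width (max_threshold L width)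

-- ===== LEMMAS AND PROOFS =====

-- both programs compute the greatest T in [0, M] (M = max of L) whose capped sum fits the budget, else 0
def IsAns (L : List Int) (width M r : Int) : Prop :=
  0 ≤ r ∧ (r = 0 ∨ (r ≤ M ∧ pvSumMin L r + 2 ≤ width)) ∧
  ∀ T, 0 ≤ T → T ≤ M → pvSumMin L T + 2 ≤ width → T ≤ r

theorem pvSumMin_mono (L : List Int) {T T' : Int} (h : T' ≤ T) :
    pvSumMin L T' ≤ pvSumMin L T := by
  induction L with
  | nil => simp [pvSumMin]
  | cons x t ih =>
    simp only [pvSumMin, List.map_cons, List.sum_cons] at *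
    have : min x T' ≤ min x T := by omega
    omega

theorem pvSumMin_perm {L L' : List Int} (h : L.Perm L') (T : Int) :
    pvSumMin L T = pvSumMin L' T :=
  List.Perm.sum_eq (h.map (fun x => min x T))

theorem isAns_unique {L : List Int} {w M r1 r2 : Int}
    (h1 : IsAns L w M r1) (h2 : IsAns L w M r2) : r1 = r2 := by
  obtain ⟨h10, h11, h12⟩ := h1
  obtain ⟨h20, h21, h22⟩ := h2
  rcases h11 with rfl | ⟨hle1, hf1⟩ <;> rcases h21 with h2z | ⟨hle2, hf2⟩
  · omega
  · have := h12 r2 h20 hle2 hf2; omega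
  · have := h22 r1 h10 hle1 hf1; omega
  · have := h12 r2 h20 hle2 hf2; have := h22 r1 h10 hle1 hf1; omega

theorem bsLoop_isAns (L : List Int) (w M : Int) (hM : ∀ x ∈ L, x ≤ M) :
    ∀ (fuel : Nat) (low high best : Int), (high + 1 - low).toNat ≤ fuel →
    0 ≤ low → low ≤ high + 1 → high ≤ M →
    ((low = 0 ∧ best = 0) ∨ (low = best + 1 ∧ 0 ≤ best ∧ pvSumMin L best + 2 ≤ w)) →
    (high = M ∨ ¬ (pvSumMin L (high + 1) + 2 ≤ w)) →
    IsAns L w M (bsLoop L w fuel low high best) := by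
  have final : ∀ (low high best : Int), ¬ low ≤ high →
      0 ≤ low → low ≤ high + 1 → high ≤ M →
      ((low = 0 ∧ best = 0) ∨ (low = best + 1 ∧ 0 ≤ best ∧ pvSumMin L best + 2 ≤ w)) →
      (high = M ∨ ¬ (pvSumMin L (high + 1) + 2 ≤ w)) →
      IsAns L w M best := by
    intro low high best h h0 hlh hhM hbest hhigh
    have hlow : low = high + 1 := by omega
    refine ⟨by rcases hbest with ⟨_, rfl⟩ | ⟨_, hb, _⟩ <;> omega, ?_, ?_⟩
    · rcases hbest with ⟨_, rfl⟩ | ⟨he, hb0, hf⟩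
      · exact Or.inl rfl
      · exact Or.inr ⟨by omega, hf⟩
    · intro T hT0 hTM hTf
      rcases hhigh with rfl | hnf
      · rcases hbest with ⟨hl0, rfl⟩ | ⟨he, hb0, hf⟩ <;> omega
      · have hTh : T ≤ high := by
          by_contra hc
          have hm := pvSumMin_mono L (show high + 1 ≤ T by omega)
          exact hnf (by omega)
        rcases hbest with ⟨hl0, rfl⟩ | ⟨he, hb0, hf⟩ <;> omega
  intro fuel
  induction fuel with
  | zero =>
    intro low high best hk h0 hlh hhM hbest hhigh
    exact final low high best (by omega) h0 hlh hhM hbest hhigh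
  | succ fuel ih =>
    intro low high best hk h0 hlh hhM hbest hhigh
    rw [bsLoop]
    split
    · rename_i h
      obtain ⟨hT1, hT2⟩ := PySem.Int.floordiv_two_mid_bounds h
      dsimp only
      split
      · rename_i hfeas
        exact ih _ _ _ (by omega) (by omega) (by omega) hhM
          (Or.inr ⟨rfl, by omega, hfeas⟩) hhigh
      · rename_i hfeas
        refine ih _ _ _ (by omega) h0 (by omega) (by omega) hbest (Or.inr ?_)
        have : PySem.Int.floordiv (low + high) 2 - 1 + 1 = PySem.Int.floordiv (low + high) 2 := by omega
        rw [this]; exact hfeas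
    · rename_i h
      exact final low high best h h0 hlh hhM hbest hhigh

theorem A_isAns (L : List Int) (w M : Int) (hmax : PySem.List.max? L (fun x => x) = some M) :
    IsAns L w M (max_threshold L w) := by
  have hMx : ∀ x ∈ L, x ≤ M := fun x hx => by simpa using PySem.List.max?_isMax hmax x hx
  simp only [max_threshold, hmax]
  by_cases hM0 : 0 ≤ M
  · exact bsLoop_isAns L w M hMx (M + 1).toNat 0 M 0 (by omega) le_rfl (by omega) le_rfl
      (Or.inl ⟨rfl, rfl⟩) (Or.inl rfl)
  · have hz : (M + 1).toNat = 0 := by omega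
    rw [hz, bsLoop]
    exact ⟨le_rfl, Or.inl rfl, fun T hT0 hTM _ => by omega⟩

theorem segment_sum (p r : List Int) (v lo T : Int)
    (hpair : (p ++ v :: r).Pairwise (fun a b => a ≤ b))
    (hp : ∀ x ∈ p, x ≤ lo) (hloT : lo ≤ T) (hTv : T < v) :
    pvSumMin (p ++ v :: r) T = p.sum + T * ((r.length : Int) + 1) := by
  obtain ⟨hpp, hvr, hcross⟩ := List.pairwise_append.mp hpair
  have hvle : ∀ y ∈ v :: r, v ≤ y := by
    intro y hy
    rcases List.mem_cons.mp hy with rfl | hy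
    · exact le_rfl
    · exact (List.pairwise_cons.mp hvr).1 y hy
  unfold pvSumMin
  rw [List.map_append, List.sum_append]
  have h1 : p.map (fun x => min x T) = p.map id :=
    List.map_congr_left (fun x hx => min_eq_left (le_trans (hp x hx) hloT))
  have h2 : (v :: r).map (fun x => min x T) = (v :: r).map (fun _ => T) :=
    List.map_congr_left (fun y hy => min_eq_right (le_of_lt (lt_of_lt_of_le hTv (hvle y hy))))
  rw [h1, h2, List.map_id, PySem.List.sum_map_const_int]
  push_cast [List.length_cons]
  ring

theorem fold_inv (w : Int) :
    ∀ (r p : List Int) (ans lo : Int),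
    ((p ++ r).Pairwise (fun a b => a ≤ b)) →
    (∀ x ∈ p, x ≤ lo) →
    ((p = [] ∧ lo = 0) ∨ lo ∈ p) →
    0 ≤ ans → (ans = 0 ∨ ans ≤ lo) →
    (ans = 0 ∨ pvSumMin (p ++ r) ans + 2 ≤ w) →
    (∀ T, 0 ≤ T → T < lo → pvSumMin (p ++ r) T + 2 ≤ w → T ≤ ans) →
    0 ≤ (r.foldl (altStep (w - 2)) (ans, p.sum, lo, (r.length : Int))).1 ∧
    ((r.foldl (altStep (w - 2)) (ans, p.sum, lo, (r.length : Int))).1 = 0 ∨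
      (r.foldl (altStep (w - 2)) (ans, p.sum, lo, (r.length : Int))).1 ≤ r.getLastD lo) ∧
    ((r.foldl (altStep (w - 2)) (ans, p.sum, lo, (r.length : Int))).1 = 0 ∨
      pvSumMin (p ++ r) (r.foldl (altStep (w - 2)) (ans, p.sum, lo, (r.length : Int))).1 + 2 ≤ w) ∧
    (∀ T, 0 ≤ T → T < r.getLastD lo → pvSumMin (p ++ r) T + 2 ≤ w →
      T ≤ (r.foldl (altStep (w - 2)) (ans, p.sum, lo, (r.length : Int))).1) := by
  intro r
  induction r with
  | nil =>
    intro p ans lo _ _ _ h0 hlo hfeas hcov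
    simp only [List.foldl_nil, List.getLastD_nil, List.append_nil] at *
    exact ⟨h0, hlo, hfeas, hcov⟩
  | cons v r' ih =>
    intro p ans lo hpair hp hmem h0 hlo hfeas hcov
    obtain ⟨hpp, hvr, hcross⟩ := List.pairwise_append.mp hpair
    have hlen : ((v :: r').length : Int) = (r'.length : Int) + 1 := by
      push_cast [List.length_cons]; ring
    set c0 : Int := PySem.Int.floordiv (w - 2 - p.sum) ((v :: r').length : Int) with hc0
    set c : Int := if c0 > v - 1 then v - 1 else c0 with hc
    set a' : Int := if c ≥ lo ∧ c ≥ 0 ∧ c > ans then c else ans with ha'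
    have hstep : altStep (w - 2) (ans, p.sum, lo, ((v :: r').length : Int)) v
        = (a', p.sum + v, v, ((v :: r').length : Int) - 1) := rfl
    have hcle : c ≤ c0 ∧ c ≤ v - 1 := by
      rw [hc]; split <;> omega
    -- the capped sum on the segment [lo, v) is linear with slope = number of remaining elements
    have hbridge : ∀ T, lo ≤ T → T < v → (pvSumMin (p ++ v :: r') T + 2 ≤ w ↔ T ≤ c0) := by
      intro T h1 h2
      rw [segment_sum p r' v lo T hpair hp h1 h2, hc0,
        PySem.Int.le_floordiv_iff_mul_le (by omega : (0:Int) < ((v :: r').length : Int)), hlen]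
      constructor <;> intro hx <;> omega
    rw [List.foldl_cons, hstep]
    have e1 : p.sum + v = (p ++ [v]).sum := by simp
    have e2 : ((v :: r').length : Int) - 1 = (r'.length : Int) := by omega
    rw [e1, e2, List.append_cons p v r', List.getLastD_cons]
    refine ih (p ++ [v]) a' v ?_ ?_ ?_ ?_ ?_ ?_ ?_
    · rw [← List.append_cons]; exact hpair
    · intro x hx
      rcases List.mem_append.mp hx with hxp | hxv
      · exact hcross x hxp v (List.mem_cons_self)
      · simp at hxv; omega
    · exact Or.inr (by simp)
    · rw [ha']; split <;> omega
    · rw [ha']; split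
      · rename_i hcond; exact Or.inr (by omega)
      · rcases hlo with h | h
        · exact Or.inl h
        · rcases hmem with ⟨rfl, rfl⟩ | hlop
          · exact Or.inl (by omega)
          · exact Or.inr (le_trans h (hcross lo hlop v (List.mem_cons_self)))
    · rw [← List.append_cons, ha']; split
      · rename_i hcond
        exact Or.inr ((hbridge c (by omega) (by omega)).mpr hcle.1)
      · rcases hfeas with h | h
        · exact Or.inl h
        · exact Or.inr h
    · intro T hT0 hTv hTf
      rw [← List.append_cons] at hTf
      by_cases hTlo : T < lo
      · have := hcov T hT0 hTlo hTf
        rw [ha']; split <;> omega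
      · have hTc0 : T ≤ c0 := (hbridge T (by omega) hTv).mp hTf
        have hTc : T ≤ c := by rw [hc]; split <;> omega
        rw [ha']; split
        · omega
        · rename_i hcond
          have : ¬ c > ans := fun hgt => hcond ⟨by omega, by omega, hgt⟩
          omega

theorem B_isAns (L : List Int) (w M : Int) (hmax : PySem.List.max? L (fun x => x) = some M) :
    IsAns L w M (max_threshold_alt L w) := by
  have hneL : L ≠ [] := List.ne_nil_of_mem (PySem.List.max?_mem hmax)
  have hMx : ∀ x ∈ L, x ≤ M := fun x hx => by simpa using PySem.List.max?_isMax hmax x hx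
  set s := PySem.List.sorted L (fun x => x) false with hs
  have hsne : s ≠ [] := fun h => hneL ((PySem.List.sorted_eq_nil_iff L _ false).mp h)
  have hperm : s.Perm L := PySem.List.sorted_perm L _ false
  have hpair : s.Pairwise (fun a b => a ≤ b) := by
    simpa using PySem.List.sorted_pairwise L (fun x => x)
  have hlast : s.getLast? = some (s.getLast hsne) := List.getLast?_eq_some_getLast hsne
  have hM'M : s.getLast hsne = M := by
    refine le_antisymm (hMx _ (hperm.subset (List.getLast_mem hsne))) ?_
    obtain ⟨i, hi, hieq⟩ := List.getElem_of_mem (hperm.mem_iff.mpr (PySem.List.max?_mem hmax))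
    have hmono := PySem.List.sorted_id_getElem_mono (xs := L) (p := i) (q := s.length - 1)
      (by omega) (by rw [← hs]; have := List.length_pos_of_ne_nil hsne; omega)
    simp only [← hs] at hmono
    rw [List.getLast_eq_getElem]
    omega
  have hglD : s.getLastD 0 = M := by
    rw [List.getLastD_eq_getLast?, hlast, Option.getD_some, hM'M]
  simp only [max_threshold_alt, ← hs, PySem.List.pyGet?_neg_one, hlast, hM'M]
  by_cases hMneg : M < 0
  · rw [if_pos hMneg]
    exact ⟨le_rfl, Or.inl rfl, fun T hT0 hTM _ => by omega⟩
  · rw [if_neg hMneg]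
    by_cases hsum : s.sum ≤ w - 2
    · rw [if_pos hsum]
      have hSM : pvSumMin L M = s.sum := by
        rw [pvSumMin_perm hperm.symm]
        unfold pvSumMin
        rw [show s.map (fun x => min x M) = s.map id from
          List.map_congr_left (fun x hx => min_eq_left (hMx x (hperm.subset hx))), List.map_id]
      exact ⟨by omega, Or.inr ⟨le_rfl, by omega⟩, fun T hT0 hTM _ => hTM⟩
    · rw [if_neg hsum]
      have hcall := fold_inv w s [] 0 0 (by simpa using hpair) (by simp)
        (Or.inl ⟨rfl, rfl⟩) le_rfl (Or.inl rfl) (Or.inl rfl) (fun T h1 h2 _ => by omega)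
      simp only [List.nil_append, List.sum_nil] at hcall
      obtain ⟨c1, c2, c3, c4⟩ := hcall
      rw [hglD] at c2 c4
      refine ⟨c1, ?_, ?_⟩
      · rcases c3 with h | h
        · exact Or.inl h
        · refine Or.inr ⟨by omega, ?_⟩
          rw [pvSumMin_perm hperm.symm]; exact h
      · intro T hT0 hTM hTf
        rcases lt_or_eq_of_le hTM with hlt | rfl
        · exact c4 T hT0 hlt (by rw [← pvSumMin_perm hperm.symm]; exact hTf)
        · exfalso
          have hSM : pvSumMin L T = s.sum := by
            rw [pvSumMin_perm hperm.symm]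
            unfold pvSumMin
            rw [show s.map (fun x => min x T) = s.map id from
              List.map_congr_left (fun x hx => min_eq_left (hMx x (hperm.subset hx))), List.map_id]
          omega

-- ===== VERDICT (by name: the statement is the Claim_ definition above) =====
theorem max_threshold_spec : Claim_equal_max_threshold := by
  intro L width _ hpre
  have hne : L ≠ [] := hpre
  obtain ⟨M, hM⟩ : ∃ M, PySem.List.max? L (fun x => x) = some M := by
    cases h : PySem.List.max? L (fun x => x) with
    | none => exact absurd ((PySem.List.max?_eq_none_iff L (fun x => x)).mp h) hne
    | some m => exact ⟨m, rfl⟩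
  exact isAns_unique (A_isAns L width M hM) (B_isAns L width M hM)
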